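-- pv_equiv track=rewrite | github.com/andriacap/GeoNature-Demo-NS | contrib/occtax/backend/utils.py | get_nomenclature_filters
-- ===== SOURCE A (Python) =====
-- counting_nomenclatures = [
--     "id_nomenclature_life_stage",
--     "id_nomenclature_sex",
--     "id_nomenclature_obj_count",
--     "id_nomenclature_type_count",
--     "id_nomenclature_valid_status",
-- ]
--
-- occ_nomenclatures = [
--     "id_nomenclature_obs_technique",
--     "id_nomenclature_bio_condition",
--     "id_nomenclature_bio_status",
--     "id_nomenclature_naturalness",
--     "id_nomenclature_exist_proof",
--     "id_nomenclature_observation_status",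
--     "id_nomenclature_blurring",
--     "id_nomenclature_determination_method",
--     "id_nomenclature_behaviour",
-- ]
--
-- releve_nomenclatures = [
--     "id_nomenclature_tech_collect_campanule",
--     "id_nomenclature_grp_typ",
-- ]
--
-- def get_nomenclature_filters(params):
--     """
--         return all the nomenclatures from query paramters
--         filters by table
--     """
--     counting_filters = []
--     occurrence_filters = []
--     releve_filters = []
--
--     for p in params:
--         if p[:2] == "id":
--             if p in counting_nomenclatures:
--                 counting_filters.append(p)
--             elif p in occ_nomenclatures:
--                 occurrence_filters.append(p)
--             elif p in releve_nomenclatures: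
--                 releve_filters.append(p)
--     return releve_filters, occurrence_filters, counting_filters
-- ===== SOURCE B (Python) =====
-- counting_nomenclatures = [
--     "id_nomenclature_life_stage",
--     "id_nomenclature_sex",
--     "id_nomenclature_obj_count",
--     "id_nomenclature_type_count",
--     "id_nomenclature_valid_status",
-- ]
--
-- occ_nomenclatures = [
--     "id_nomenclature_obs_technique",
--     "id_nomenclature_bio_condition",
--     "id_nomenclature_bio_status",
--     "id_nomenclature_naturalness",
--     "id_nomenclature_exist_proof",
--     "id_nomenclature_observation_status",
--     "id_nomenclature_blurring",
--     "id_nomenclature_determination_method",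
--     "id_nomenclature_behaviour",
-- ]
--
-- releve_nomenclatures = [
--     "id_nomenclature_tech_collect_campanule",
--     "id_nomenclature_grp_typ",
-- ]
--
-- def get_nomenclature_filters(params):
--     """Same result via three independent filtering passes; the 'id' prefix
--     guard is redundant because every nomenclature name starts with 'id'."""
--     return (
--         [p for p in params if p in releve_nomenclatures],
--         [p for p in params if p in occ_nomenclatures],
--         [p for p in params if p in counting_nomenclatures],
--     )
-- ===== Notes on version B (the rewrite author's own statement) =====
-- stated objective: simpler
-- what changed: Replaces the single classifying loop with if/elif dispatch and three mutated accumulators by three independent filtering comprehensions (one per nomenclature table), dropping the redundant 'id'-prefix guard since every nomenclature name starts with 'id' and the three tables are disjoint.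
import Mathlib
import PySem

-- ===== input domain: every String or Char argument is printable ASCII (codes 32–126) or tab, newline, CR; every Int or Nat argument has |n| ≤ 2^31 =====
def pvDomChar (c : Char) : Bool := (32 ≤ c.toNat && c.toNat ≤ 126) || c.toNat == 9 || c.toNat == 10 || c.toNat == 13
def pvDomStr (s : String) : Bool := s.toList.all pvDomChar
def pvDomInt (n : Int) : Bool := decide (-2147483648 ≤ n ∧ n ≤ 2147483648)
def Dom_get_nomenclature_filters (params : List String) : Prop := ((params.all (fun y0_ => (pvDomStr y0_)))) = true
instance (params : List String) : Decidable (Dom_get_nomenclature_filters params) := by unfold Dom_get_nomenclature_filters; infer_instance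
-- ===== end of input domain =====

-- B replaces A's single classifying loop (if/elif dispatch into three accumulators) by
-- three independent membership-filter passes, dropping the redundant "id"-prefix guard.

def counting_nomenclatures : List String :=
  [ "id_nomenclature_life_stage",
    "id_nomenclature_sex",
    "id_nomenclature_obj_count",
    "id_nomenclature_type_count",
    "id_nomenclature_valid_status" ]

def occ_nomenclatures : List String :=
  [ "id_nomenclature_obs_technique",
    "id_nomenclature_bio_condition",
    "id_nomenclature_bio_status",
    "id_nomenclature_naturalness",
    "id_nomenclature_exist_proof",
    "id_nomenclature_observation_status",
    "id_nomenclature_blurring",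
    "id_nomenclature_determination_method",
    "id_nomenclature_behaviour" ]

def releve_nomenclatures : List String :=
  [ "id_nomenclature_tech_collect_campanule",
    "id_nomenclature_grp_typ" ]

-- ===== PORT A =====
-- one pass; state = (counting_filters, occurrence_filters, releve_filters)
def get_nomenclature_filters_step (acc : List String × List String × List String)
    (p : String) : List String × List String × List String :=
  if PySem.Str.slice p none (some 2) = "id" then
    if p ∈ counting_nomenclatures then (acc.1 ++ [p], acc.2.1, acc.2.2)
    else if p ∈ occ_nomenclatures then (acc.1, acc.2.1 ++ [p], acc.2.2)
    else if p ∈ releve_nomenclatures then (acc.1, acc.2.1, acc.2.2 ++ [p])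
    else acc
  else acc

def get_nomenclature_filters (params : List String) : List String × List String × List String :=
  let r := params.foldl get_nomenclature_filters_step ([], [], [])
  (r.2.2, r.2.1, r.1)

-- ===== PORT B =====
def get_nomenclature_filters_alt (params : List String) : List String × List String × List String :=
  ( params.filter (fun p => p ∈ releve_nomenclatures),
    params.filter (fun p => p ∈ occ_nomenclatures),
    params.filter (fun p => p ∈ counting_nomenclatures) )

-- ===== PRECONDITION & SPEC =====
def Spec_get_nomenclature_filters (params : List String) (out : List String × List String × List String) : Prop := out = get_nomenclature_filters_alt params
instance (params : List String) (out : List String × List String × List String) : Decidable (Spec_get_nomenclature_filters params out) := by unfold Spec_get_nomenclature_filters; infer_instance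

-- ===== CLAIM (what is proved, stated in full; the proofs are below) =====
def Claim_equal_get_nomenclature_filters : Prop := ∀ (params : List String), Dom_get_nomenclature_filters params → Spec_get_nomenclature_filters params (get_nomenclature_filters params)

-- ===== LEMMAS AND PROOFS =====

theorem step_eq (acc : List String × List String × List String) (p : String) :
    get_nomenclature_filters_step acc p =
      (acc.1 ++ (if p ∈ counting_nomenclatures then [p] else []),
       acc.2.1 ++ (if p ∈ occ_nomenclatures then [p] else []),
       acc.2.2 ++ (if p ∈ releve_nomenclatures then [p] else [])) := by
  unfold get_nomenclature_filters_step
  by_cases hc : p ∈ counting_nomenclatures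
  · have hid : PySem.Str.slice p none (some 2) = "id" := by
      simp [counting_nomenclatures] at hc
      rcases hc with h | h | h | h | h <;> subst h <;> decide
    have ho : p ∉ occ_nomenclatures := by
      simp [counting_nomenclatures] at hc
      rcases hc with h | h | h | h | h <;> subst h <;> decide
    have hr : p ∉ releve_nomenclatures := by
      simp [counting_nomenclatures] at hc
      rcases hc with h | h | h | h | h <;> subst h <;> decide
    simp [hid, hc, ho, hr]
  · by_cases ho : p ∈ occ_nomenclatures
    · have hid : PySem.Str.slice p none (some 2) = "id" := by
        simp [occ_nomenclatures] at ho
        rcases ho with h | h | h | h | h | h | h | h | h <;> subst h <;> decide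
      have hr : p ∉ releve_nomenclatures := by
        simp [occ_nomenclatures] at ho
        rcases ho with h | h | h | h | h | h | h | h | h <;> subst h <;> decide
      simp [hid, hc, ho, hr]
    · by_cases hr : p ∈ releve_nomenclatures
      · have hid : PySem.Str.slice p none (some 2) = "id" := by
          simp [releve_nomenclatures] at hr
          rcases hr with h | h <;> subst h <;> decide
        simp [hid, hc, ho, hr]
      · by_cases hid : PySem.Str.slice p none (some 2) = "id" <;>
          simp [hid, hc, ho, hr]

theorem foldl_closed (params : List String) (acc : List String × List String × List String) :
    params.foldl get_nomenclature_filters_step acc =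
      (acc.1 ++ params.filter (fun p => p ∈ counting_nomenclatures),
       acc.2.1 ++ params.filter (fun p => p ∈ occ_nomenclatures),
       acc.2.2 ++ params.filter (fun p => p ∈ releve_nomenclatures)) := by
  induction params generalizing acc with
  | nil => simp
  | cons p ps ih =>
    simp only [List.foldl_cons, ih, step_eq, List.filter_cons]
    by_cases hc : p ∈ counting_nomenclatures <;>
      by_cases ho : p ∈ occ_nomenclatures <;>
        by_cases hr : p ∈ releve_nomenclatures <;>
          simp [hc, ho, hr]

-- ===== VERDICT (by name: the statement is the Claim_ definition above) =====
theorem get_nomenclature_filters_spec : Claim_equal_get_nomenclature_filters := by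
  intro params _
  unfold Spec_get_nomenclature_filters get_nomenclature_filters get_nomenclature_filters_alt
  simp [foldl_closed]
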